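-- pv_equiv track=rewrite | github.com/alan-lira/diff-sequences | sequences_handler/sequences_handler.py | generate_sequences_indices_list
-- ===== SOURCE A (Python) =====
-- def generate_sequences_indices_list(N: int,
--                                     max_DS: int) -> list:
--     sequences_indices_list = []
--     first_data_structure_sequences_indices_list = []
--     second_data_structure_sequences_indices_list = []
--     first_data_structure_first_sequence_index = 0
--     first_data_structure_last_sequence_index = N - 1
--     first_data_structure_sequences_index_range = range(first_data_structure_first_sequence_index,
--                                                        first_data_structure_last_sequence_index)
--     for first_data_structure_sequence_index in first_data_structure_sequences_index_range:
--         second_data_structure_first_sequence_index = first_data_structure_sequence_index + 1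
--         second_data_structure_last_sequence_index = N
--         second_data_structure_last_sequence_added = 0
--         while second_data_structure_last_sequence_added != second_data_structure_last_sequence_index - 1:
--             first_data_structure_sequences_indices_list.append(first_data_structure_sequence_index)
--             sequences_on_second_data_structure_count = 0
--             second_data_structure_sequence_index = 0
--             for second_data_structure_sequence_index in range(second_data_structure_first_sequence_index,
--                                                               second_data_structure_last_sequence_index):
--                 second_data_structure_sequences_indices_list.extend([second_data_structure_sequence_index])
--                 sequences_on_second_data_structure_count = sequences_on_second_data_structure_count + 1
--                 if sequences_on_second_data_structure_count == max_DS: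
--                     break
--             if len(first_data_structure_sequences_indices_list) > 0 \
--                     and len(second_data_structure_sequences_indices_list) > 0:
--                 sequences_indices_list.append([first_data_structure_sequences_indices_list,
--                                                second_data_structure_sequences_indices_list])
--                 second_data_structure_last_sequence_added = second_data_structure_sequence_index
--                 second_data_structure_first_sequence_index = second_data_structure_last_sequence_added + 1
--             first_data_structure_sequences_indices_list = []
--             second_data_structure_sequences_indices_list = []
--     return sequences_indices_list
-- ===== SOURCE B (Python) =====
-- def generate_sequences_indices_list(N: int, max_DS: int) -> list:
--     result = []
--     for i in range(N - 1):
--         seconds = list(range(i + 1, N))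
--         if max_DS > 0:
--             for j in range(0, len(seconds), max_DS):
--                 result.append([[i], seconds[j:j + max_DS]])
--         else:
--             result.append([[i], seconds])
--     return result
-- ===== Notes on version B (the rewrite author's own statement) =====
-- stated objective: simpler
-- what changed: Replaces A's cursor-driven while-loop chunker (manual break-counting inner loop, cursor/last-added bookkeeping, list resets) with a direct nested for: for each i, slice range(i+1, N) in strides of max_DS (single whole block when max_DS <= 0).
import Mathlib
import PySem

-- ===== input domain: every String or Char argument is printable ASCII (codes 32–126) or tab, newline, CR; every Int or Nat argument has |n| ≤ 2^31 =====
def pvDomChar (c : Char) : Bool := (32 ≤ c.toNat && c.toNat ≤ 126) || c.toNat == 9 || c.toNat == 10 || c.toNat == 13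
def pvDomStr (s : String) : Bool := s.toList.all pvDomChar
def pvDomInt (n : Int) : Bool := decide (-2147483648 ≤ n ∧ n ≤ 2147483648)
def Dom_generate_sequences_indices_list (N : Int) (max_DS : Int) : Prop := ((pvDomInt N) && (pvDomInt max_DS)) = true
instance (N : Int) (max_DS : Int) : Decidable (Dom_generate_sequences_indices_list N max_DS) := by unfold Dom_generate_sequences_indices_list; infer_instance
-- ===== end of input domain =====

-- B replaces A's cursor-driven while-loop chunker with direct slicing of range(i+1, N)
-- in strides of max_DS (objective: simpler); both programs are pure (return value only).

-- ===== PORT A =====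
-- inner 'for … in range(first, last): append; count += 1; if count == max_DS: break';
-- state: (second list so far, count, current loop variable); returns (second list, loop variable)
def pvAInner (max_DS : Int) : List Int → List Int → Int → Int → List Int × Int
  | [], second, _count, idx => (second, idx)
  | x :: rest, second, count, _idx =>
      let second' := second ++ [x]
      let count' := count + 1
      if count' = max_DS then (second', x) else pvAInner max_DS rest second' count' x

-- the 'while last_added != N - 1' loop; the fuel only makes the recursion structural
-- (proved sufficient below: each productive iteration consumes at least one second index)
def pvAWhile (N max_DS i : Int) : Nat → Int → Int → List (List (List Int)) → List (List (List Int))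
  | 0, _, _, acc => acc
  | fuel+1, first, lastAdded, acc =>
      if lastAdded = N - 1 then acc
      else
        let firstList : List Int := [i]
        let p := pvAInner max_DS (PySem.List.pyRange first N 1) [] 0 0
        if 0 < firstList.length ∧ 0 < p.1.length then
          pvAWhile N max_DS i fuel (p.2 + 1) p.2 (acc ++ [[firstList, p.1]])
        else
          pvAWhile N max_DS i fuel first lastAdded acc

def generate_sequences_indices_list (N : Int) (max_DS : Int) : List (List (List Int)) :=
  (PySem.List.pyRange 0 (N - 1) 1).foldl
    (fun acc i => pvAWhile N max_DS i (N.toNat + 1) (i + 1) 0 acc) []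

-- ===== PORT B =====
def generate_sequences_indices_list_alt (N : Int) (max_DS : Int) : List (List (List Int)) :=
  (PySem.List.pyRange 0 (N - 1) 1).foldl
    (fun acc i =>
      let seconds := PySem.List.pyRange (i + 1) N 1
      if max_DS > 0 then
        acc ++ (PySem.List.pyRange 0 (PySem.List.len seconds) max_DS).map
          (fun j => [[i], PySem.List.slice seconds (some j) (some (j + max_DS))])
      else acc ++ [[[i], seconds]]) []

-- ===== PRECONDITION & SPEC =====
def Spec_generate_sequences_indices_list (N : Int) (max_DS : Int) (out : List (List (List Int))) : Prop := out = generate_sequences_indices_list_alt N max_DS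
instance (N : Int) (max_DS : Int) (out : List (List (List Int))) : Decidable (Spec_generate_sequences_indices_list N max_DS out) := by unfold Spec_generate_sequences_indices_list; infer_instance

-- ===== CLAIM (what is proved, stated in full; the proofs are below) =====
def Claim_equal_generate_sequences_indices_list : Prop := ∀ (N : Int) (max_DS : Int), Dom_generate_sequences_indices_list N max_DS → Spec_generate_sequences_indices_list N max_DS (generate_sequences_indices_list N max_DS)

-- ===== LEMMAS AND PROOFS =====

-- chunks of size d (d ≥ 1 in use)
def chunkL (d : Nat) : List Int → List (List Int)
  | [] => []
  | x :: xs => (x :: xs.take (d-1)) :: chunkL d (xs.drop (d-1))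
termination_by xs => xs.length
decreasing_by simp

lemma chunkL_cons (d : Nat) (hd : 1 ≤ d) (x : Int) (xs : List Int) :
    chunkL d (x :: xs) = (x :: xs).take d :: chunkL d ((x :: xs).drop d) := by
  obtain ⟨e, rfl⟩ : ∃ e, d = e + 1 := ⟨d - 1, by omega⟩
  rw [chunkL.eq_def]
  simp

lemma chunkL_ne (d : Nat) (hd : 1 ≤ d) (xs : List Int) (h : xs ≠ []) :
    chunkL d xs = xs.take d :: chunkL d (xs.drop d) := by
  cases xs with
  | nil => exact absurd rfl h
  | cons x rest => exact chunkL_cons d hd x rest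

lemma lastD_cons (x idx : Int) (l : List Int) :
    (x :: l).getLast?.getD idx = l.getLast?.getD x := by
  cases l with
  | nil => simp
  | cons y ys =>
      rw [List.getLast?_cons_cons, List.getLast?_eq_some_getLast (by simp)]
      simp

lemma innerA_pos (d : Int) (hd : 0 < d) :
    ∀ (ys second : List Int) (count idx : Int), 0 ≤ count → count < d →
      pvAInner d ys second count idx =
        (second ++ ys.take (d - count).toNat, (ys.take (d - count).toNat).getLastD idx) := by
  intro ys
  induction ys with
  | nil => intro second count idx h0 h1; simp [pvAInner]
  | cons x rest ih =>
      intro second count idx h0 h1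
      simp only [pvAInner]
      by_cases h : count + 1 = d
      · have : (d - count).toNat = 1 := by omega
        simp [h, this]
      · have h2 : count + 1 < d := by omega
        rw [if_neg h, ih _ _ _ (by omega) h2]
        have h3 : (d - count).toNat = (d - (count + 1)).toNat + 1 := by omega
        simp [h3]
        rw [lastD_cons]

lemma innerA_nonpos (d : Int) (hd : d ≤ 0) :
    ∀ (ys second : List Int) (count idx : Int), 0 ≤ count →
      pvAInner d ys second count idx = (second ++ ys, ys.getLastD idx) := by
  intro ys
  induction ys with
  | nil => intro second count idx h0; simp [pvAInner]
  | cons x rest ih =>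
      intro second count idx h0
      simp only [pvAInner]
      rw [if_neg (by omega), ih _ _ _ (by omega)]
      simp
      rw [lastD_cons]

lemma pyRange_take (a b : Int) (k : Nat) (hab : a ≤ b) :
    (PySem.List.pyRange a b 1).take k = PySem.List.pyRange a (min (a + k) b) 1 := by
  induction k generalizing a with
  | zero =>
      simp only [Nat.cast_zero, add_zero, List.take_zero]
      rw [min_eq_left hab, PySem.List.pyRange_one_eq_nil le_rfl]
  | succ k ih =>
      by_cases h : a < b
      · rw [PySem.List.pyRange_one_cons h, List.take_succ_cons, ih (a+1) (by omega),
            PySem.List.pyRange_one_cons (a := a) (b := min (a + (k+1:Nat)) b) (by push_cast; omega)]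
        congr 2
        push_cast; omega
      · rw [PySem.List.pyRange_one_eq_nil (by omega), PySem.List.pyRange_one_eq_nil (by push_cast; omega)]
        simp

lemma pyRange_drop (a b : Int) (k : Nat) (hab : a ≤ b) :
    (PySem.List.pyRange a b 1).drop k = PySem.List.pyRange (min (a + k) b) b 1 := by
  induction k generalizing a with
  | zero =>
      simp only [Nat.cast_zero, add_zero, List.drop_zero]
      rw [min_eq_left hab]
  | succ k ih =>
      by_cases h : a < b
      · rw [PySem.List.pyRange_one_cons h, List.drop_succ_cons, ih (a+1) (by omega)]
        congr 2
        push_cast; omega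
      · rw [PySem.List.pyRange_one_eq_nil (by omega)]
        simp
        rw [PySem.List.pyRange_one_eq_nil (by push_cast; omega)]

lemma getLastD_pyRange (a b x : Int) (h : a < b) :
    (PySem.List.pyRange a b 1).getLastD x = b - 1 := by
  have hb : b = (b - 1) + 1 := by omega
  rw [hb, PySem.List.pyRange_one_succ_right (by omega)]
  simp

lemma pyRange_pos_count (a b d : Int) (hd : 0 < d) (hab : a < b) :
    (if a < b then ((b - a + d - 1) / d).toNat else 0)
      = ((b - a - 1) / d).toNat + 1 := by
  rw [if_pos hab]
  have h1 : b - a + d - 1 = (b - a - 1) + 1 * d := by ring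
  rw [h1, Int.add_mul_ediv_right _ _ (by omega : d ≠ 0)]
  have h2 : 0 ≤ (b - a - 1) / d := Int.ediv_nonneg (by omega) (by omega)
  omega

lemma pyRange_pos_cons (a b d : Int) (hd : 0 < d) (hab : a < b) :
    PySem.List.pyRange a b d = a :: PySem.List.pyRange (a + d) b d := by
  rw [PySem.List.pyRange_of_pos _ _ hd, PySem.List.pyRange_of_pos _ _ hd,
      pyRange_pos_count a b d hd hab]
  have hm : (if a + d < b then ((b - (a + d) + d - 1) / d).toNat else 0)
      = ((b - a - 1) / d).toNat := by
    split_ifs with h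
    · congr 1; ring
    · rw [Int.ediv_eq_zero_of_lt (by omega) (by omega)]; simp
  rw [hm, List.range_succ_eq_map]
  simp only [List.map_cons, List.map_map, Nat.cast_zero, mul_zero, add_zero]
  congr 1
  apply List.map_congr_left
  intro k _
  simp [Function.comp, Nat.succ_eq_add_one]
  push_cast; ring

lemma pyRange_pos_shift (a b d : Int) (hd : 0 < d) :
    PySem.List.pyRange (a + d) b d = (PySem.List.pyRange a (b - d) d).map (· + d) := by
  rw [PySem.List.pyRange_of_pos _ _ hd, PySem.List.pyRange_of_pos _ _ hd]
  have hc : (a + d < b) ↔ (a < b - d) := by constructor <;> intro <;> omega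
  rw [show b - (a + d) + d - 1 = b - d - a + d - 1 by ring]
  simp only [hc, List.map_map]
  apply List.map_congr_left
  intro k _
  simp [Function.comp]
  ring

lemma pyRange_pos_shift0 (b d : Int) (hd : 0 < d) :
    PySem.List.pyRange d b d = (PySem.List.pyRange 0 (b - d) d).map (· + d) := by
  have := pyRange_pos_shift 0 b d hd
  simpa using this

lemma B_chunk (d : Int) (hd : 0 < d) :
    ∀ (n : Nat) (xs : List Int), xs.length = n →
      (PySem.List.pyRange 0 (xs.length : Int) d).map
        (fun j => PySem.List.slice xs (some j) (some (j + d))) = chunkL d.toNat xs := by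
  intro n
  induction n using Nat.strong_induction_on with
  | _ n ih =>
      intro xs hlen
      cases xs with
      | nil =>
          rw [PySem.List.pyRange_of_pos _ _ hd, chunkL.eq_def]
          simp
      | cons x rest =>
          have hL : (0:Int) < ((x :: rest).length : Int) := by
            exact_mod_cast Nat.succ_pos rest.length
          rw [pyRange_pos_cons 0 _ d hd hL, List.map_cons, zero_add,
              pyRange_pos_shift0 _ d hd]
          have hhead : PySem.List.slice (x :: rest) (some 0) (some d)
              = (x :: rest).take d.toNat := by
            rw [PySem.List.slice_toNat _ (by omega) (by omega)]
            simp
          rw [hhead]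
          have hdrop : ∀ (j : Int), 0 ≤ j →
              PySem.List.slice (x :: rest) (some (j + d)) (some (j + d + d))
                = PySem.List.slice ((x :: rest).drop d.toNat) (some j) (some (j + d)) := by
            intro j hj
            rw [PySem.List.slice_toNat _ (by omega) (by omega),
                PySem.List.slice_toNat _ (by omega) (by omega), List.drop_drop]
            have e1 : (j + d + d).toNat - (j + d).toNat = (j + d).toNat - j.toNat := by omega
            have e2 : (j + d).toNat = d.toNat + j.toNat := by omega
            rw [e1, e2]
          by_cases hcase : (d : Int) < ((x :: rest).length : Int)
          · have hlen2 : ((x :: rest).drop d.toNat).length = (x :: rest).length - d.toNat := by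
              simp
            have hcast : (((x :: rest).drop d.toNat).length : Int)
                = ((x :: rest).length : Int) - d := by
              rw [hlen2]; push_cast; omega
            have ihh := ih ((x :: rest).drop d.toNat).length
              (by rw [hlen2]; omega) ((x :: rest).drop d.toNat) rfl
            rw [hcast] at ihh
            rw [chunkL_ne d.toNat (by omega) _ (by simp)]
            congr 1
            rw [← ihh, List.map_map, PySem.List.pyRange_of_pos _ _ hd]
            simp only [List.map_map]
            apply List.map_congr_left
            intro k _
            have hk : (0:Int) ≤ d * (k : Int) := by positivity
            simp only [Function.comp, zero_add]
            exact hdrop (d * (k : Int)) hk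
          · -- d ≥ length: single chunk
            rw [PySem.List.pyRange_of_pos _ _ hd]
            have : ¬ ((0:Int) < ((x :: rest).length : Int) - d) := by omega
            rw [if_neg this]
            simp only [List.range_zero, List.map_nil]
            rw [chunkL_ne d.toNat (by omega) _ (by simp)]
            have h1 : (x :: rest).take d.toNat = x :: rest := by
              apply List.take_of_length_le
              simp at hcase ⊢
              omega
            have h2 : (x :: rest).drop d.toNat = [] := by
              apply List.drop_eq_nil_of_le
              simp at hcase ⊢
              omega
            rw [h1, h2, chunkL.eq_def]

lemma whileA_pos (N d i : Int) (hd : 0 < d) :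
    ∀ (fuel : Nat) (first lastAdded : Int) (acc : List (List (List Int))),
      first < N → lastAdded ≠ N - 1 → (N - first).toNat + 1 ≤ fuel →
      pvAWhile N d i fuel first lastAdded acc
        = acc ++ (chunkL d.toNat (PySem.List.pyRange first N 1)).map (fun c => [[i], c]) := by
  intro fuel
  induction fuel with
  | zero => intro first lastAdded acc h1 h2 h3; omega
  | succ f ihf =>
      intro first lastAdded acc h1 h2 h3
      simp only [pvAWhile, if_neg h2]
      rw [innerA_pos d hd _ _ _ _ le_rfl hd]
      simp only [sub_zero, List.nil_append]
      rw [pyRange_take first N d.toNat h1.le]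
      have hdt : ((d.toNat : Nat) : Int) = d := Int.toNat_of_nonneg hd.le
      set m : Int := min (first + (d.toNat : Int)) N with hm
      have hfm : first < m := by rw [hm]; rw [hdt] at *; omega
      have hmN : m ≤ N := by rw [hm]; omega
      have hchunkne : PySem.List.pyRange first m 1 ≠ [] := by
        rw [PySem.List.pyRange_one_cons hfm]; simp
      rw [if_pos ⟨by simp, List.length_pos_iff.mpr hchunkne⟩]
      simp only [List.getLastD_eq_getLast?] at *
      have hlast : (PySem.List.pyRange first m 1).getLast?.getD 0 = m - 1 := by
        have := getLastD_pyRange first m 0 hfm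
        simpa using this
      rw [hlast]
      have hm1 : m - 1 + 1 = m := by omega
      rw [hm1]
      have hchunk : chunkL d.toNat (PySem.List.pyRange first N 1)
          = PySem.List.pyRange first m 1 :: chunkL d.toNat (PySem.List.pyRange m N 1) := by
        rw [chunkL_ne d.toNat (by omega) _ (by rw [PySem.List.pyRange_one_cons h1]; simp),
            pyRange_take first N d.toNat h1.le, pyRange_drop first N d.toNat h1.le]
      rw [hchunk]
      clear_value m
      by_cases hmN' : m = N
      · subst hmN'
        have hf1 : 1 ≤ f := by omega
        obtain ⟨g, rfl⟩ : ∃ g, f = g + 1 := ⟨f - 1, by omega⟩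
        simp only [pvAWhile, if_pos rfl]
        rw [PySem.List.pyRange_one_eq_nil le_rfl, chunkL.eq_def]
        simp
      · have hmN2 : m < N := lt_of_le_of_ne hmN hmN'
        rw [ihf m (m - 1) _ hmN2 (by omega) (by omega)]
        simp

lemma whileA_nonpos (N d i : Int) (hd : d ≤ 0) (fuel : Nat) (first lastAdded : Int)
    (acc : List (List (List Int)))
    (h1 : first < N) (h2 : lastAdded ≠ N - 1) (h3 : 2 ≤ fuel) :
    pvAWhile N d i fuel first lastAdded acc = acc ++ [[[i], PySem.List.pyRange first N 1]] := by
  obtain ⟨f, rfl⟩ : ∃ f, fuel = f + 1 := ⟨fuel - 1, by omega⟩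
  obtain ⟨g, rfl⟩ : ∃ g, f = g + 1 := ⟨f - 1, by omega⟩
  simp only [pvAWhile, if_neg h2]
  rw [innerA_nonpos d hd _ _ _ _ le_rfl]
  have hne : PySem.List.pyRange first N 1 ≠ [] := by
    rw [PySem.List.pyRange_one_cons h1]; simp
  rw [if_pos ⟨by simp, List.length_pos_iff.mpr hne⟩]
  simp only [List.getLastD_eq_getLast?] at *
  have hlast : (PySem.List.pyRange first N 1).getLast?.getD 0 = N - 1 := by
    have := getLastD_pyRange first N 0 h1
    simpa using this
  rw [hlast]
  simp only [pvAWhile, if_pos rfl]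
  simp

-- ===== VERDICT (by name: the statement is the Claim_ definition above) =====
theorem generate_sequences_indices_list_spec : Claim_equal_generate_sequences_indices_list := by
  intro N d _
  show generate_sequences_indices_list N d = generate_sequences_indices_list_alt N d
  unfold generate_sequences_indices_list generate_sequences_indices_list_alt
  apply PySem.List.foldl_congr_mem
  intro acc i hi
  rw [PySem.List.mem_pyRange_one] at hi
  by_cases hd : 0 < d
  · rw [if_pos hd,
        whileA_pos N d i hd (N.toNat + 1) (i + 1) 0 acc (by omega) (by omega) (by omega)]
    congr 1
    rw [PySem.List.len_eq,
        ← B_chunk d hd (PySem.List.pyRange (i + 1) N 1).length _ rfl, List.map_map]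
    rfl
  · rw [if_neg hd,
        whileA_nonpos N d i (by omega) (N.toNat + 1) (i + 1) 0 acc (by omega) (by omega) (by omega)]
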